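-- pv_equiv track=rewrite | github.com/minenam/algorithm-total | 백준/Bronze/2775. 부녀회장이 될테야/부녀회장이 될테야.py | apartment_count
-- ===== SOURCE A (Python) =====
-- def apartment_count(k: int, n: int):
--     dp = [[0] * (n + 1) for _ in range(k + 1)]
--
--     for j in range(1, n + 1):
--         dp[0][j] = j
--
--     for i in range(1, k + 1):
--         for j in range(1, n + 1):
--             dp[i][j] = dp[i][j - 1] + dp[i - 1][j]
--
--     return dp[k][n]
-- ===== SOURCE B (Python) =====
-- def apartment_count(k: int, n: int):
--     # closed form: the answer is the binomial coefficient C(n + k, k + 1),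
--     # computed by the multiplicative formula in O(k) steps (each // is exact).
--     r = 1
--     for i in range(1, k + 2):
--         r = r * (n - 1 + i) // i
--     return r
-- ===== Notes on version B (the rewrite author's own statement) =====
-- stated objective: faster
-- what changed: Replaces the (k+1)x(n+1) cumulative DP table with the closed-form binomial coefficient C(n+k, k+1) computed by the multiplicative formula in a single O(k) loop.
import Mathlib
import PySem

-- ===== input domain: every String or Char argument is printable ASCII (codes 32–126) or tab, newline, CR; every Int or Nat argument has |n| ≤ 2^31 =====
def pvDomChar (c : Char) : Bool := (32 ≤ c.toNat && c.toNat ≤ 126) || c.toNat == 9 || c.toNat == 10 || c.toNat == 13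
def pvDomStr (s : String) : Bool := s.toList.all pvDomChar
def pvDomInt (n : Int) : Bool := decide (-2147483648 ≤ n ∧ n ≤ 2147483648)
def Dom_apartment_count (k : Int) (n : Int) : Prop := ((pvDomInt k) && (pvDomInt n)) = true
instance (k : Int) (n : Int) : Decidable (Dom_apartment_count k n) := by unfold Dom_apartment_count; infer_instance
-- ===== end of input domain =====

-- B replaces A's O(k*n) cumulative DP table by the closed-form binomial
-- coefficient C(n+k, k+1) computed in one O(k) multiplicative loop (faster).

-- ===== PORT A =====
-- dp[i][j] read/write on a list-of-lists table (indices are in range on Pre_)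
def pvGet2 (dp : List (List Int)) (i j : Nat) : Int := (dp.getD i []).getD j 0
def pvSet2 (dp : List (List Int)) (i j : Nat) (v : Int) : List (List Int) :=
  dp.set i ((dp.getD i []).set j v)

def apartment_count (k : Int) (n : Int) : Int :=
  let dp : List (List Int) :=
    (PySem.List.pyRange 0 (k + 1) 1).map (fun _ => List.replicate (n + 1).toNat 0)
  let dp := (PySem.List.pyRange 1 (n + 1) 1).foldl (fun d j => pvSet2 d 0 j.toNat j) dp
  let dp := (PySem.List.pyRange 1 (k + 1) 1).foldl (fun d i =>
      (PySem.List.pyRange 1 (n + 1) 1).foldl (fun d' j =>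
        pvSet2 d' i.toNat j.toNat
          (pvGet2 d' i.toNat (j.toNat - 1) + pvGet2 d' (i.toNat - 1) j.toNat)) d) dp
  pvGet2 dp k.toNat n.toNat

-- ===== PORT B =====
def apartment_count_alt (k : Int) (n : Int) : Int :=
  (PySem.List.pyRange 1 (k + 2) 1).foldl
    (fun r i => PySem.Int.floordiv (r * (n - 1 + i)) i) 1

-- ===== PRECONDITION & SPEC =====
-- A raises IndexError when k < 0 (dp is empty) or n < 0 (rows are empty); exactly those inputs are excluded.
def Pre_apartment_count (k : Int) (n : Int) : Prop := 0 ≤ k ∧ 0 ≤ n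
instance (k : Int) (n : Int) : Decidable (Pre_apartment_count k n) := by
  unfold Pre_apartment_count; infer_instance
def pvWitness_apartment_count : Int × Int := (3, 4)

def Spec_apartment_count (k : Int) (n : Int) (out : Int) : Prop := out = apartment_count_alt k n
instance (k : Int) (n : Int) (out : Int) : Decidable (Spec_apartment_count k n out) := by
  unfold Spec_apartment_count; infer_instance

-- ===== CLAIM (what is proved, stated in full; the proofs are below) =====
def Claim_equal_apartment_count : Prop := ∀ (k : Int) (n : Int), Dom_apartment_count k n → Pre_apartment_count k n → Spec_apartment_count k n (apartment_count k n)

-- ===== LEMMAS AND PROOFS =====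

-- the value dp[i][j] holds at the end of A's loops: C(i+j, i+1)
def pvC (i j : Nat) : Int := ((i + j).choose (i + 1) : Int)

def pvRow (i N : Nat) : List Int := (List.range (N + 1)).map (fun j => pvC i j)

-- the whole table after outer iteration i: rows 0..i filled, the rest still zero
def pvTab (K N i : Nat) : List (List Int) :=
  (List.range (K + 1)).map (fun t => if t ≤ i then pvRow t N else List.replicate (N + 1) 0)

-- pyRange 1 (M+1) 1 enumerated as Nats
theorem pvRange_ones (M : Nat) :
    PySem.List.pyRange 1 ((M : Int) + 1) 1 = (List.range M).map (fun t : Nat => (t : Int) + 1) := by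
  induction M with
  | zero => simp [PySem.List.pyRange_one_eq_nil]
  | succ m ih =>
      rw [show ((m + 1 : Nat) : Int) + 1 = ((m : Nat) : Int) + 1 + 1 by push_cast; ring,
        PySem.List.pyRange_one_succ_right (by omega), ih, List.range_succ]
      simp

-- B computes the binomial coefficient C(N+K, K+1)
theorem altB (K N : Nat) :
    (List.range (K + 1)).foldl
      (fun (r : Int) (t : Nat) => PySem.Int.floordiv (r * ((N : Int) - 1 + ((t : Int) + 1))) ((t : Int) + 1)) 1
      = ((N + K).choose (K + 1) : Int) := by
  induction K with
  | zero =>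
      simp [PySem.Int.floordiv]
  | succ m ih =>
      rw [List.range_succ, List.foldl_append, ih]
      have key : (N + m + 1) * (N + m).choose (m + 1)
          = (N + m + 1).choose (m + 2) * (m + 2) := Nat.add_one_mul_choose_eq (N + m) (m + 1)
      have harith : ((N + m).choose (m + 1) : Int) * ((N : Int) - 1 + (((m + 1 : Nat) : Int) + 1))
          = ((N + m + 1).choose (m + 2) : Int) * (((m + 1 : Nat) : Int) + 1) := by
        have : (((N + m + 1) * (N + m).choose (m + 1) : Nat) : Int)
            = (((N + m + 1).choose (m + 2) * (m + 2) : Nat) : Int) := by exact_mod_cast key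
        push_cast at this ⊢
        nlinarith [this]
      simp only [List.foldl_cons, List.foldl_nil]
      rw [harith, PySem.Int.floordiv_eq_ediv_of_pos (by push_cast; omega),
        Int.mul_ediv_cancel _ (by push_cast; omega)]
      rw [show N + m + 1 = N + (m + 1) from by omega]

-- a fold that only rewrites row i (reading a fixed other row i') acts on that row alone
theorem foldl_set_row2 {a : Type} (i i' : Nat) (h : i' ≠ i)
    (f : List Int → List Int → a → List Int)
    (dp : List (List Int)) (l : List a) :
    l.foldl (fun d x => d.set i (f (d.getD i' []) (d.getD i []) x)) dp
      = dp.set i (l.foldl (f (dp.getD i' [])) (dp.getD i [])) := by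
  induction l generalizing dp with
  | nil =>
      by_cases hlen : i < dp.length
      · simp only [List.foldl_nil, List.getD]
        rw [List.getElem?_eq_getElem hlen]; simp
      · rw [List.foldl_nil, List.set_eq_of_length_le (by omega)]
  | cons x xs ih =>
      by_cases hlen : i < dp.length
      · rw [List.foldl_cons, ih, List.set_set, List.foldl_cons]
        have e1 : (dp.set i (f (dp.getD i' []) (dp.getD i []) x)).getD i' []
            = dp.getD i' [] := by
          simp [List.getD, List.getElem?_set_ne (Ne.symm h)]
        have e2 : (dp.set i (f (dp.getD i' []) (dp.getD i []) x)).getD i []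
            = f (dp.getD i' []) (dp.getD i []) x := by
          simp [List.getD, List.getElem?_set_self hlen]
        rw [e1, e2]
      · rw [List.foldl_cons, List.set_eq_of_length_le (by omega), ih,
          List.set_eq_of_length_le (by omega), List.set_eq_of_length_le (by omega)]

-- the row-0 initialisation loop fills row 0 with 0,1,...,m (rest still 0)
theorem row0_fold (N m : Nat) (hm : m ≤ N) :
    ((List.range m).map (fun t : Nat => (t : Int) + 1)).foldl
      (fun (q : List Int) (j : Int) => q.set j.toNat j) (List.replicate (N + 1) 0)
      = (List.range (N + 1)).map (fun j => if j ≤ m then (j : Int) else 0) := by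
  induction m with
  | zero =>
      apply List.ext_getElem (by simp)
      intro j h1 h2
      simp only [List.range_zero, List.map_nil, List.foldl_nil, List.getElem_replicate,
        List.getElem_map, List.getElem_range]
      split_ifs with h
      · interval_cases j; simp
      · rfl
  | succ m ih =>
      rw [List.range_succ, List.map_append, List.foldl_append, ih (by omega)]
      simp only [List.map_cons, List.map_nil, List.foldl_cons, List.foldl_nil]
      have ht : ((m : Int) + 1).toNat = m + 1 := by omega
      rw [ht]
      apply List.ext_getElem (by simp)
      intro j h1 h2
      rw [List.getElem_set]
      simp only [List.getElem_map, List.getElem_range]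
      simp only [List.length_set, List.length_map, List.length_range] at h1
      by_cases hj : m + 1 = j
      · subst hj; simp
      · rw [if_neg hj]
        have h5 : (j ≤ m) ↔ (j ≤ m + 1) := by omega
        simp only [h5]

-- one inner-loop pass over row i+1, reading the finished row i
theorem rowi_fold (N i m : Nat) (hm : m ≤ N) :
    ((List.range m).map (fun t : Nat => (t : Int) + 1)).foldl
      (fun (q : List Int) (j : Int) =>
        q.set j.toNat (q.getD (j.toNat - 1) 0 + (pvRow i N).getD j.toNat 0))
      (List.replicate (N + 1) 0)
      = (List.range (N + 1)).map (fun j => if j ≤ m then pvC (i + 1) j else 0) := by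
  induction m with
  | zero =>
      apply List.ext_getElem (by simp)
      intro j h1 h2
      simp only [List.range_zero, List.map_nil, List.foldl_nil, List.getElem_replicate,
        List.getElem_map, List.getElem_range]
      split_ifs with h
      · interval_cases j
        simp [pvC]
      · rfl
  | succ m ih =>
      rw [List.range_succ, List.map_append, List.foldl_append, ih (by omega)]
      simp only [List.map_cons, List.map_nil, List.foldl_cons, List.foldl_nil]
      have ht : ((m : Int) + 1).toNat = m + 1 := by omega
      rw [ht]
      have hcur : ((List.range (N + 1)).map
          (fun j => if j ≤ m then pvC (i + 1) j else 0)).getD (m + 1 - 1) 0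
          = pvC (i + 1) m := by
        rw [PySem.List.getD_map_range _ _ _ _ (by omega)]
        simp
      have hprev : (pvRow i N).getD (m + 1) 0 = pvC i (m + 1) := by
        unfold pvRow
        rw [PySem.List.getD_map_range _ _ _ _ (by omega)]
      rw [hcur, hprev]
      have hpascal : pvC (i + 1) m + pvC i (m + 1) = pvC (i + 1) (m + 1) := by
        unfold pvC
        have h1 : i + 1 + m = i + m + 1 := by omega
        have h2 : i + (m + 1) = i + m + 1 := by omega
        have h3 : i + 1 + (m + 1) = (i + m + 1) + 1 := by omega
        rw [h1, h2, h3, Nat.choose_succ_succ (i + m + 1) (i + 1)]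
        push_cast
        ring
      rw [hpascal]
      apply List.ext_getElem (by simp)
      intro j h1 h2
      rw [List.getElem_set]
      simp only [List.getElem_map, List.getElem_range]
      simp only [List.length_set, List.length_map, List.length_range] at h1
      by_cases hj : m + 1 = j
      · subst hj; simp
      · rw [if_neg hj]
        have h5 : (j ≤ m) ↔ (j ≤ m + 1) := by omega
        simp only [h5]

-- factoring the port's inner loop through foldl_set_row2
theorem inner_factor (I : Nat) (hI : 1 ≤ I) (dp : List (List Int)) (l : List Int) :
    l.foldl (fun d' j =>
        pvSet2 d' I j.toNat (pvGet2 d' I (j.toNat - 1) + pvGet2 d' (I - 1) j.toNat)) dp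
      = dp.set I (l.foldl
          (fun q j => q.set j.toNat (q.getD (j.toNat - 1) 0 + (dp.getD (I - 1) []).getD j.toNat 0))
          (dp.getD I [])) :=
  foldl_set_row2 I (I - 1) (by omega)
    (fun p q (j : Int) => q.set j.toNat (q.getD (j.toNat - 1) 0 + p.getD j.toNat 0)) dp l

theorem row0_factor (dp : List (List Int)) (l : List Int) :
    l.foldl (fun d j => pvSet2 d 0 j.toNat j) dp
      = dp.set 0 (l.foldl (fun (q : List Int) (j : Int) => q.set j.toNat j) (dp.getD 0 [])) :=
  foldl_set_row2 0 1 (by omega) (fun _ q (j : Int) => q.set j.toNat j) dp l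

-- the finished shape of a filled row
theorem rowI_final (N I : Nat) :
    (List.range (N + 1)).map (fun j => if j ≤ N then pvC I j else 0) = pvRow I N := by
  unfold pvRow
  apply List.ext_getElem (by simp)
  intro j h1 h2
  simp only [List.length_map, List.length_range] at h1
  simp only [List.getElem_map, List.getElem_range]
  rw [if_pos (by omega)]

theorem row0_final (N : Nat) :
    (List.range (N + 1)).map (fun j => if j ≤ N then (j : Int) else 0) = pvRow 0 N := by
  unfold pvRow pvC
  apply List.ext_getElem (by simp)
  intro j h1 h2
  simp only [List.length_map, List.length_range] at h1
  simp only [List.getElem_map, List.getElem_range]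
  rw [if_pos (by omega)]
  simp [Nat.choose_one_right]

-- the table after the row-0 loop
theorem tab_init (K N : Nat) :
    (List.replicate (K + 1) (List.replicate (N + 1) (0 : Int))).set 0
      ((List.range (N + 1)).map (fun j => if j ≤ N then (j : Int) else 0)) = pvTab K N 0 := by
  rw [row0_final]
  apply List.ext_getElem (by simp [pvTab])
  intro t h1 h2
  rw [List.getElem_set]
  unfold pvTab
  simp only [List.getElem_map, List.getElem_range, List.getElem_replicate]
  by_cases ht : 0 = t
  · subst ht
    rw [if_pos rfl, if_pos (le_refl 0)]
  · rw [if_neg ht, if_neg (by omega)]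

-- one outer-loop step: row I gets filled
theorem tab_step (K N I : Nat) (h1 : 1 ≤ I) :
    (pvTab K N (I - 1)).set I ((List.range (N + 1)).map
        (fun j => if j ≤ N then pvC I j else 0)) = pvTab K N I := by
  rw [rowI_final]
  apply List.ext_getElem (by simp [pvTab])
  intro t ht1 ht2
  rw [List.getElem_set]
  unfold pvTab
  simp only [List.getElem_map, List.getElem_range]
  by_cases ht : I = t
  · subst ht
    rw [if_pos rfl, if_pos (le_refl I)]
  · rw [if_neg ht]
    have h5 : (t ≤ I - 1) ↔ (t ≤ I) := by omega
    simp only [h5]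

-- reads of the finished part of the table
theorem tab_getD_filled (K N I t : Nat) (h1 : t ≤ I) (h2 : t ≤ K) :
    (pvTab K N I).getD t [] = pvRow t N := by
  unfold pvTab
  rw [PySem.List.getD_map_range _ _ _ _ (by omega), if_pos h1]

theorem tab_getD_zero (K N I t : Nat) (h1 : I < t) (h2 : t ≤ K) :
    (pvTab K N I).getD t [] = List.replicate (N + 1) 0 := by
  unfold pvTab
  rw [PySem.List.getD_map_range _ _ _ _ (by omega), if_neg (by omega)]

-- the outer loop maintains pvTab
theorem outer_fold (K N m : Nat) (hm : m ≤ K) :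
    ((List.range m).map (fun t : Nat => (t : Int) + 1)).foldl
      (fun d i =>
        ((List.range N).map (fun t : Nat => (t : Int) + 1)).foldl
          (fun d' j => pvSet2 d' i.toNat j.toNat
            (pvGet2 d' i.toNat (j.toNat - 1) + pvGet2 d' (i.toNat - 1) j.toNat)) d)
      (pvTab K N 0)
      = pvTab K N m := by
  induction m with
  | zero => simp
  | succ m ih =>
      rw [List.range_succ, List.map_append, List.foldl_append, ih (by omega)]
      simp only [List.map_cons, List.map_nil, List.foldl_cons, List.foldl_nil]
      have ht : ((m : Int) + 1).toNat = m + 1 := by omega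
      rw [ht, inner_factor (m + 1) (by omega),
        show m + 1 - 1 = m from rfl,
        tab_getD_filled K N m m (le_refl m) (by omega),
        tab_getD_zero K N m (m + 1) (by omega) (by omega),
        rowi_fold N m N (le_refl N)]
      exact tab_step K N (m + 1) (by omega)

theorem apartment_count_spec : Claim_equal_apartment_count := by
  intro k n _ hpre
  obtain ⟨hk, hn⟩ := hpre
  obtain ⟨K, rfl⟩ : ∃ K : Nat, k = (K : Int) := ⟨k.toNat, (Int.toNat_of_nonneg hk).symm⟩
  obtain ⟨N, rfl⟩ : ∃ N : Nat, n = (N : Int) := ⟨n.toNat, (Int.toNat_of_nonneg hn).symm⟩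
  unfold Spec_apartment_count apartment_count apartment_count_alt
  dsimp only
  -- B side
  have hB : PySem.List.pyRange 1 ((K : Int) + 2) 1
      = (List.range (K + 1)).map (fun t : Nat => (t : Int) + 1) := by
    rw [show ((K : Int) + 2) = ((K + 1 : Nat) : Int) + 1 by push_cast; ring, pvRange_ones]
  rw [hB, List.foldl_map, altB K N]
  -- A side
  rw [show ((K : Int) + 1) = ((K : Nat) : Int) + 1 from rfl, pvRange_ones K,
    show ((N : Int) + 1) = ((N : Nat) : Int) + 1 from rfl, pvRange_ones N]
  have hinit : (PySem.List.pyRange 0 ((K : Int) + 1) 1).map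
        (fun _ => List.replicate ((N : Int) + 1).toNat (0 : Int)) =
      List.replicate (K + 1) (List.replicate (N + 1) (0 : Int)) := by
    rw [List.map_const', PySem.List.length_pyRange_one,
      show ((N : Int) + 1).toNat = N + 1 by omega,
      show (((K : Int) + 1) - 0).toNat = K + 1 by omega]
  rw [hinit, row0_factor,
    show (List.replicate (K + 1) (List.replicate (N + 1) (0 : Int))).getD 0 []
      = List.replicate (N + 1) (0 : Int) from List.getD_replicate _ (by omega),
    row0_fold N N (le_refl N)]
  have hset : (List.replicate (K + 1) (List.replicate (N + 1) (0 : Int))).set 0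
      ((List.range (N + 1)).map (fun j => if j ≤ N then (j : Int) else 0)) = pvTab K N 0 :=
    tab_init K N
  rw [hset, outer_fold K N K (le_refl K)]
  rw [show ((K : Int)).toNat = K by omega, show ((N : Int)).toNat = N by omega]
  unfold pvGet2
  rw [tab_getD_filled K N K K (le_refl K) (le_refl K)]
  unfold pvRow
  rw [PySem.List.getD_map_range _ _ _ _ (by omega)]
  unfold pvC
  rw [show K + N = N + K from by omega]
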